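-- pv_equiv track=rewrite | github.com/xnossisx/spark-ectf | proofofconcept/proof4.py | next_required_intermediate
-- ===== SOURCE A (Python) =====
-- def next_required_intermediate(start):
--     complement = 0
--     for section in range(15, -1, -1):
--         # Round up the range
--         bit = (1 << (section * 4))
--         mask = bit * 15
--         common = mask & start
--         if common != 0:
--             complement = mask - common + bit
--     return start + complement
-- ===== SOURCE B (Python) =====
-- def next_required_intermediate(start):
--     # Loop-free closed form: isolate the lowest set bit of start's low
--     # word with the classic clear-lowest-bit trick; its bit_length locates
--     # the lowest nonzero nibble, and one shift round-up finishes the job.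
--     t = start % (1 << 64)
--     if t == 0:
--         return start
--     low = t - (t & (t - 1))            # lowest set bit of the low word
--     shift = ((low.bit_length() + 3) // 4) * 4
--     return ((start >> shift) + 1) << shift
-- ===== Notes on version B (the rewrite author's own statement) =====
-- stated objective: alternative
-- what changed: B replaces A's sixteen-step nibble scan with mask/complement accumulation by a loop-free closed form: it isolates the lowest set bit of start's low sixty-four bits with the clear-lowest-bit trick t-(t&(t-1)), reads off the lowest nonzero nibble from its bit_length, and rounds start up with one shift expression.
import Mathlib
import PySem

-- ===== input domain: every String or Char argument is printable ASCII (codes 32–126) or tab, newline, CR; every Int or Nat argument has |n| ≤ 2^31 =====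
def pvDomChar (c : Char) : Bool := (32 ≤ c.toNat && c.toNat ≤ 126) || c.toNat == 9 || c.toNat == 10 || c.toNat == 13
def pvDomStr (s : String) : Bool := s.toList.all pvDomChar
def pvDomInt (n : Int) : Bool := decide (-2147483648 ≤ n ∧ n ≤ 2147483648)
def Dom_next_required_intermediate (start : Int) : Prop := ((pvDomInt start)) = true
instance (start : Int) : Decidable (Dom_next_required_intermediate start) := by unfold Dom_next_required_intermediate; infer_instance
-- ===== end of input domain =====

-- B replaces A's sixteen-step nibble scan (mask/complement accumulation) by a loop-free
-- closed form: isolate the lowest set bit of start's low machine-word bits with t-(t&(t-1)),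
-- read the lowest nonzero nibble off its bit_length, round up with one shift
-- (objective: alternative; equal value proved for all inputs).


-- ===== PORT A =====
def next_required_intermediate (start : Int) : Int :=
  -- 'section * 4' is a nonnegative shift for every section in range(15, -1, -1),
  -- so '.toNat' is exact here; '&' is PySem.Int.band (Python-exact on negatives).
  let complement :=
    (PySem.List.pyRange 15 (-1) (-1)).foldl (fun complement sec =>
      let bit : Int := (1 : Int) <<< ((sec.toNat * 4 : Nat))
      let mask : Int := bit * 15
      let common : Int := PySem.Int.band mask start
      if common ≠ 0 then mask - common + bit else complement) 0
  start + complement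

-- ===== PORT B =====
def next_required_intermediate_alt (start : Int) : Int :=
  let t := PySem.Int.mod start ((1 : Int) <<< (64 : Nat))
  if t = 0 then start
  else
    let low := t - PySem.Int.band t (t - 1)
    -- 'low.bit_length()' is PySem.Int.bitLength (a Nat); '(bl + 3) // 4 * 4' is
    -- Nat floor division here, exact since everything involved is nonnegative.
    let shift : Nat := (PySem.Int.bitLength low + 3) / 4 * 4
    ((start >>> shift) + 1) <<< shift

-- ===== PRECONDITION & SPEC =====
def Spec_next_required_intermediate (start : Int) (out : Int) : Prop := out = next_required_intermediate_alt start
instance (start : Int) (out : Int) : Decidable (Spec_next_required_intermediate start out) := by unfold Spec_next_required_intermediate; infer_instance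

-- ===== CLAIM (what is proved, stated in full; the proofs are below) =====
def Claim_equal_next_required_intermediate : Prop := ∀ (start : Int), Dom_next_required_intermediate start → Spec_next_required_intermediate start (next_required_intermediate start)

-- ===== LEMMAS AND PROOFS =====

-- proof-only reference program: the ascending first-hit nibble scan; both ports
-- are proved equal to it.
def nriAltGo (start : Int) : List Int → Int
  | [] => start
  | p :: ps =>
    if PySem.Int.mod (PySem.Int.floordiv start ((16 : Int) ^ p.toNat)) 16 ≠ 0 then
      let unit : Int := (16 : Int) ^ (p.toNat + 1)
      (PySem.Int.floordiv start unit + 1) * unit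
    else nriAltGo start ps

-- the ascending list of nibble indices [k, k+1, ..., k+n-1] as Ints
def nriAsc (k n : Nat) : List Int := (List.range' k n).map Int.ofNat

-- Nat core of the bit identity: masking out nibble k is div/mod arithmetic.
theorem nriNatCore (k n : Nat) : (15 * 16 ^ k) &&& n = (n / 16 ^ k % 16) * 16 ^ k := by
  have h16 : (16 : Nat) ^ k = 2 ^ (4 * k) := by
    rw [show (16 : Nat) = 2 ^ 4 from rfl, ← pow_mul]
  rw [h16, ← Nat.shiftRight_eq_div_pow,
      show (n >>> (4 * k)) % 16 = (n >>> (4 * k)) &&& (2 ^ 4 - 1) from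
        (Nat.and_two_pow_sub_one_eq_mod _ 4).symm,
      show (15 : Nat) * 2 ^ (4 * k) = (2 ^ 4 - 1) <<< (4 * k) from by
        rw [Nat.shiftLeft_eq]; norm_num,
      show ((n >>> (4 * k)) &&& (2 ^ 4 - 1)) * 2 ^ (4 * k)
          = ((n >>> (4 * k)) &&& (2 ^ 4 - 1)) <<< (4 * k) from (Nat.shiftLeft_eq _ _).symm]
  apply Nat.eq_of_testBit_eq
  intro i
  simp only [Nat.testBit_and, Nat.testBit_shiftLeft, Nat.testBit_shiftRight,
    Nat.testBit_two_pow_sub_one]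
  by_cases hi : 4 * k ≤ i
  · simp [hi, Nat.add_sub_cancel' hi, Bool.and_comm]
  · simp [hi]

-- floor division/remainder of a negative x by a positive divisor, via -x-1 ≥ 0
theorem nriNegDiv (d x : Int) (hd : 0 < d) (hx : x < 0) :
    x / d = -((-x - 1) / d) - 1 ∧ x % d = d - 1 - (-x - 1) % d := by
  have h1 : (0:Int) ≤ -x - 1 := by omega
  have h2 := Int.emod_nonneg (-x - 1) (by omega : d ≠ 0)
  have h3 := Int.emod_lt_of_pos (-x - 1) hd
  have h4 := Int.mul_ediv_add_emod (-x - 1) d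
  exact (Int.ediv_emod_unique (a := x) (b := d)
      (q := -((-x - 1) / d) - 1) (r := d - 1 - (-x - 1) % d) hd).mpr
      ⟨by ring_nf; ring_nf at h4; omega, by omega, by omega⟩

-- A's 'mask & start' in arithmetic form, for every Int (incl. negatives).
theorem nriBand (k : Nat) (x : Int) :
    PySem.Int.band (15 * (16 : Int) ^ k) x = (x / (16 : Int) ^ k % 16) * (16 : Int) ^ k := by
  have hm : (15 * (16 : Int) ^ k) = ((15 * 16 ^ k : Nat) : Int) := by push_cast; ring
  by_cases hx : 0 ≤ x
  · have hxe : x = ((x.toNat : Nat) : Int) := (Int.toNat_of_nonneg hx).symm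
    rw [hxe, hm, PySem.Int.band_natCast, nriNatCore]
    push_cast
    ring
  · replace hx : x < 0 := by omega
    set n : Nat := (-x - 1).toNat with hn
    have hnx : ((n : Nat) : Int) = -x - 1 := Int.toNat_of_nonneg (by omega)
    have hy : x / (16:Int) ^ k = -(((n / 16 ^ k : Nat) : Int)) - 1 := by
      rw [(nriNegDiv ((16:Int) ^ k) x (by positivity) hx).1, ← hnx]
      push_cast
      ring
    have hnib : x / (16:Int) ^ k % 16 = 15 - ((n / 16 ^ k % 16 : Nat) : Int) := by
      have hq0 : (0:Int) ≤ ((n / 16 ^ k : Nat) : Int) := Int.natCast_nonneg _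
      have hylt : x / (16:Int) ^ k < 0 := by rw [hy]; linarith
      have h2 := (nriNegDiv 16 (x / (16:Int) ^ k) (by norm_num) hylt).2
      have h3 : -(x / (16:Int) ^ k) - 1 = ((n / 16 ^ k : Nat) : Int) := by rw [hy]; ring
      rw [h2, h3]
      push_cast
      ring
    have hband : PySem.Int.band (15 * (16 : Int) ^ k) x
        = (((15 * 16 ^ k : Nat) - ((15 * 16 ^ k : Nat) &&& n) : Nat) : Int) := by
      rw [hm]
      simp only [PySem.Int.band]
      rw [if_pos (by positivity : (0:Int) ≤ ((15 * 16 ^ k : Nat) : Int)),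
          if_neg (by omega : ¬ (0:Int) ≤ x), Int.toNat_natCast, ← hn]
    have hlt : n / 16 ^ k % 16 < 16 := Nat.mod_lt _ (by norm_num)
    have hle : (n / 16 ^ k % 16) * 16 ^ k ≤ 15 * 16 ^ k :=
      Nat.mul_le_mul_right _ (by omega)
    rw [hband, nriNatCore, Nat.cast_sub hle, hnib]
    push_cast
    ring

-- peel one nibble off an Int modulus
theorem nriDecomp (k : Nat) (x : Int) :
    x % (16 : Int) ^ (k + 1) = x % (16 : Int) ^ k + (16 : Int) ^ k * (x / (16 : Int) ^ k % 16) := by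
  have h1 : x / (16:Int) ^ (k+1) = x / (16:Int) ^ k / 16 := by
    rw [pow_succ, ← Int.ediv_ediv_of_nonneg (by positivity)]
  rw [Int.emod_def x ((16:Int) ^ (k+1)), h1, Int.emod_def x ((16:Int) ^ k),
      Int.emod_def (x / (16:Int) ^ k) 16]
  ring

-- the complement A adds at nibble k is a round-up to the next multiple of 16^(k+1)
theorem nriRound (k : Nat) (x : Int) (h0 : x % (16 : Int) ^ k = 0) :
    x + (15 * (16 : Int) ^ k - (x / (16 : Int) ^ k % 16) * (16 : Int) ^ k + (16 : Int) ^ k)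
      = (x / (16 : Int) ^ (k + 1) + 1) * (16 : Int) ^ (k + 1) := by
  have h1 : x / (16:Int) ^ (k+1) = x / (16:Int) ^ k / 16 := by
    rw [pow_succ, ← Int.ediv_ediv_of_nonneg (by positivity)]
  have hq : x = (16:Int) ^ k * (x / (16:Int) ^ k) := by
    have h := Int.emod_def x ((16:Int) ^ k)
    rw [h0] at h
    linarith
  have hy : x / (16:Int) ^ k % 16 = x / (16:Int) ^ k - 16 * (x / (16:Int) ^ k / 16) :=
    Int.emod_def _ _
  rw [h1, hy]
  linear_combination hq

-- A-side induction: A's descending overwrite fold over a nibble range agrees with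
-- the ascending first-hit scan, provided all nibbles below k are zero.
theorem nriMain (n : Nat) : ∀ (k : Nat) (x : Int), x % (16 : Int) ^ k = 0 →
    x + ((nriAsc k n).reverse.foldl (fun complement sec =>
        let bit : Int := (1 : Int) <<< ((sec.toNat * 4 : Nat))
        let mask : Int := bit * 15
        let common : Int := PySem.Int.band mask x
        if common ≠ 0 then mask - common + bit else complement) 0)
      = nriAltGo x (nriAsc k n) := by
  induction n with
  | zero => intro k x _; simp [nriAsc, nriAltGo]
  | succ n ih =>
    intro k x h0
    have hcons : nriAsc k (n + 1) = (k : Int) :: nriAsc (k + 1) n := by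
      rw [nriAsc, List.range'_succ, List.map_cons]; rfl
    have hbit : ((1 : Int) <<< (((k : Int).toNat) * 4)) = (16 : Int) ^ k := by
      rw [Int.toNat_natCast, Int.shiftLeft_eq, one_mul, mul_comm k 4, pow_mul]
      norm_num
    have hband : PySem.Int.band (((1 : Int) <<< (((k : Int).toNat) * 4)) * 15) x
        = (x / (16 : Int) ^ k % 16) * (16 : Int) ^ k := by
      rw [hbit, mul_comm, nriBand]
    have hfd : PySem.Int.floordiv x ((16 : Int) ^ ((k : Int).toNat)) = x / (16 : Int) ^ k := by
      rw [Int.toNat_natCast, PySem.Int.floordiv_eq_ediv_of_pos (by positivity)]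
    rw [hcons]
    simp only [List.reverse_cons, List.foldl_append, List.foldl_cons, List.foldl_nil, nriAltGo]
    rw [PySem.Int.mod_eq_emod_of_pos (by norm_num), hfd, hband, Int.toNat_natCast]
    by_cases hnib : x / (16 : Int) ^ k % 16 = 0
    · -- nibble k is zero: both sides move on to nibble k+1
      rw [hnib, if_neg (by norm_num), if_neg (by norm_num)]
      exact ih (k + 1) x (by rw [nriDecomp, h0, hnib]; ring)
    · -- nibble k is the lowest nonzero nibble: closed-form round-up on both sides
      have hne : (x / (16 : Int) ^ k % 16) * (16 : Int) ^ k ≠ 0 :=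
        mul_ne_zero hnib (by positivity)
      have hbit2 : ((1 : Int) <<< (k * 4)) = (16 : Int) ^ k := by
        rw [Int.shiftLeft_eq, one_mul, mul_comm k 4, pow_mul]
        norm_num
      rw [if_pos hne, if_pos hnib, hbit2]
      rw [PySem.Int.floordiv_eq_ediv_of_pos (by positivity)]
      rw [mul_comm ((16:Int) ^ k) 15]
      exact nriRound k x h0

-- a nibble above a divisibility level is zero
theorem nibbleZero (k : Nat) (x : Int) (h : (16 : Int) ^ (k + 1) ∣ x) :
    x / (16 : Int) ^ k % 16 = 0 := by
  rcases h with ⟨m, hm⟩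
  subst hm
  rw [show (16 : Int) ^ (k + 1) * m = (16 : Int) ^ k * (16 * m) from by ring,
      Int.mul_ediv_cancel_left _ (by positivity : (0:Int) < (16:Int)^k).ne']
  simp [Int.mul_emod_right]

-- if all listed nibbles of x are zero, the reference scan returns x
theorem nriAllZero (n : Nat) : ∀ (k : Nat) (x : Int), ((16 : Int) ^ (k + n)) ∣ x →
    nriAltGo x (nriAsc k n) = x := by
  induction n with
  | zero => intro k x _; simp [nriAsc, nriAltGo]
  | succ n ih =>
    intro k x h
    have hcons : nriAsc k (n + 1) = (k : Int) :: nriAsc (k + 1) n := by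
      rw [nriAsc, List.range'_succ, List.map_cons]; rfl
    have hk1 : (16 : Int) ^ (k + 1) ∣ x :=
      dvd_trans (pow_dvd_pow 16 (by omega)) h
    have hfd : PySem.Int.floordiv x ((16 : Int) ^ ((k : Int).toNat)) = x / (16 : Int) ^ k := by
      rw [Int.toNat_natCast, PySem.Int.floordiv_eq_ediv_of_pos (by positivity)]
    rw [hcons]
    simp only [nriAltGo]
    rw [PySem.Int.mod_eq_emod_of_pos (by norm_num), hfd, nibbleZero k x hk1,
        if_neg (by norm_num)]
    exact ih (k + 1) x (by rw [show k + 1 + n = k + (n + 1) by omega]; exact h)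

-- first-hit characterisation of the reference scan: if nibble p is the lowest
-- nonzero nibble among the listed ones, the scan is a round-up at p
theorem nriHit (n : Nat) : ∀ (k : Nat) (x : Int) (p : Nat), k ≤ p → p < k + n →
    (∀ i, k ≤ i → i < p → x / (16 : Int) ^ i % 16 = 0) →
    x / (16 : Int) ^ p % 16 ≠ 0 →
    nriAltGo x (nriAsc k n) = (x / (16 : Int) ^ (p + 1) + 1) * (16 : Int) ^ (p + 1) := by
  induction n with
  | zero => intro k x p h1 h2 _ _; omega
  | succ n ih =>
    intro k x p h1 h2 hlow hp
    have hcons : nriAsc k (n + 1) = (k : Int) :: nriAsc (k + 1) n := by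
      rw [nriAsc, List.range'_succ, List.map_cons]; rfl
    have hfd : PySem.Int.floordiv x ((16 : Int) ^ ((k : Int).toNat)) = x / (16 : Int) ^ k := by
      rw [Int.toNat_natCast, PySem.Int.floordiv_eq_ediv_of_pos (by positivity)]
    rw [hcons]
    simp only [nriAltGo]
    rw [PySem.Int.mod_eq_emod_of_pos (by norm_num), hfd, Int.toNat_natCast]
    by_cases hkp : k = p
    · subst hkp
      rw [if_pos hp, PySem.Int.floordiv_eq_ediv_of_pos (by positivity)]
    · rw [if_neg (by simpa using hlow k le_rfl (by omega)),
          ih (k + 1) x p (by omega) (by omega) (fun i hi hip => hlow i (by omega) hip) hp]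

-- clearing the lowest set bit: for odd 2*s+1, (2^j*(2s+1)) & (2^j*(2s+1) - 1) = 2^j*(2s)
theorem nriClearLow (j s : Nat) :
    (2 ^ j * (2 * s + 1)) &&& (2 ^ j * (2 * s + 1) - 1) = 2 ^ j * (2 * s) := by
  have h1 : 1 ≤ (2:Nat) ^ j := Nat.one_le_two_pow
  have hsub : 2 ^ j * (2 * s + 1) - 1 = 2 ^ j * (2 * s) + (2 ^ j - 1) := by
    ring_nf
    omega
  have hlt : (2:Nat) ^ j - 1 < 2 ^ j := by omega
  apply Nat.eq_of_testBit_eq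
  intro i
  rw [Nat.testBit_and, hsub, Nat.testBit_two_pow_mul_add _ hlt,
      Nat.testBit_two_pow_mul, Nat.testBit_two_pow_mul]
  by_cases hij : i < j
  · simp [hij, show ¬ i ≥ j by omega]
  · have hji : j ≤ i := by omega
    rw [if_neg hij]
    simp only [ge_iff_le, hji, decide_true, Bool.true_and]
    rcases Nat.exists_eq_add_of_le hji with ⟨c, rfl⟩
    rw [Nat.add_sub_cancel_left]
    cases c with
    | zero =>
      simp [Nat.testBit_zero, Nat.mul_mod_right]
    | succ c =>
      rw [Nat.testBit_add_one, Nat.testBit_add_one,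
          show (2 * s + 1) / 2 = s by omega, show (2 * s) / 2 = s by omega]
      cases s.testBit c <;> simp

-- bit_length of a power of two
theorem nriBitLenPow (j : Nat) : PySem.Int.bitLength (((2 ^ j : Nat) : Int)) = j + 1 := by
  induction j with
  | zero => decide
  | succ j ih =>
    rw [PySem.Int.bitLength_natCast (Nat.two_pow_pos (j + 1)),
        show 2 ^ (j + 1) / 2 = 2 ^ j from by rw [pow_succ]; omega, ih]

-- nibbles agree under congruence modulo 16^(k+1)
theorem nriNibbleCongr (k : Nat) (x y : Int) (h : (16 : Int) ^ (k + 1) ∣ (x - y)) :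
    x / (16 : Int) ^ k % 16 = y / (16 : Int) ^ k % 16 := by
  have hk : (16 : Int) ^ k ∣ (x - y) := dvd_trans (pow_dvd_pow 16 (Nat.le_succ k)) h
  have h1 : x % (16 : Int) ^ (k + 1) = y % (16 : Int) ^ (k + 1) :=
    ((Int.modEq_iff_dvd.mpr (by simpa using h) : Int.ModEq _ y x)).symm
  have h0 : x % (16 : Int) ^ k = y % (16 : Int) ^ k :=
    ((Int.modEq_iff_dvd.mpr (by simpa using hk) : Int.ModEq _ y x)).symm
  have hx := nriDecomp k x
  have hy := nriDecomp k y
  have h16 : (0:Int) < (16:Int) ^ k := by positivity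
  nlinarith [hx, hy, h1, h0]

-- B equals the reference scan
theorem nriAltEq (start : Int) :
    next_required_intermediate_alt start = nriAltGo start (nriAsc 0 16) := by
  have hMpos : (0:Int) < (1 : Int) <<< (64 : Nat) := by decide
  have hM : ((1 : Int) <<< (64 : Nat)) = 2 ^ 64 := by decide
  have htm : PySem.Int.mod start ((1 : Int) <<< (64 : Nat)) = start % 2 ^ 64 := by
    rw [PySem.Int.mod_eq_emod_of_pos hMpos, hM]
  simp only [next_required_intermediate_alt, htm]
  by_cases h0 : start % 2 ^ 64 = 0
  · rw [if_pos h0]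
    have hd : (16 : Int) ^ (0 + 16) ∣ start := by
      have h := Int.dvd_of_emod_eq_zero h0
      have he : (16 : Int) ^ (0 + 16) = 2 ^ 64 := by norm_num
      rw [he]; exact h
    exact (nriAllZero 16 0 start hd).symm
  · rw [if_neg h0]
    set t := start % 2 ^ 64 with htdef
    have ht0 : 0 ≤ t := Int.emod_nonneg _ (by norm_num)
    have htlt : t < 2 ^ 64 := Int.emod_lt_of_pos _ (by norm_num)
    have htc : ((t.toNat : Nat) : Int) = t := Int.toNat_of_nonneg ht0
    have htNne : t.toNat ≠ 0 := by omega
    obtain ⟨j, q, hqodd, hq⟩ := Nat.exists_eq_two_pow_mul_odd htNne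
    have hqmod : q % 2 = 1 := Nat.odd_iff.mp hqodd
    obtain ⟨s, hs⟩ : ∃ s, q = 2 * s + 1 := ⟨q / 2, by omega⟩
    -- the isolated lowest bit is 2^j
    have hband : PySem.Int.band t (t - 1) = ((t.toNat &&& (t.toNat - 1) : Nat) : Int) := by
      rw [PySem.Int.band_of_nonneg ht0 (by omega)]
      congr 2
      omega
    have hclear : t.toNat &&& (t.toNat - 1) = 2 ^ j * (2 * s) := by
      rw [hq, hs]; exact nriClearLow j s
    have hlow : t - PySem.Int.band t (t - 1) = ((2 ^ j : Nat) : Int) := by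
      rw [hband, hclear, ← htc, hq, hs]
      push_cast
      ring
    rw [hlow, nriBitLenPow]
    -- the nibble index of the lowest set bit
    set p := j / 4 with hpdef
    have hjle : 4 * p ≤ j ∧ j < 4 * (p + 1) := by constructor <;> omega
    have h2j : 2 ^ j ≤ t.toNat := by
      calc 2 ^ j = 2 ^ j * 1 := by ring
        _ ≤ 2 ^ j * q := Nat.mul_le_mul_left _ (by omega)
        _ = t.toNat := hq.symm
    have hjlt : j < 64 := by
      by_contra hc
      have : (2:Nat) ^ 64 ≤ 2 ^ j := Nat.pow_le_pow_right (by norm_num) (by omega)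
      omega
    have hp15 : p ≤ 15 := by omega
    have hshift : (j + 1 + 3) / 4 * 4 = 4 * (p + 1) := by omega
    rw [hshift]
    -- shift arithmetic: >>> is ediv by 2^shift, <<< is mul by 2^shift
    have hpow : (2 : Int) ^ (4 * (p + 1)) = (16 : Int) ^ (p + 1) := by
      rw [show (16 : Int) = 2 ^ 4 from by norm_num, ← pow_mul]
    have hpowc : (((2 ^ (4 * (p + 1)) : Nat) : Nat) : Int) = (16 : Int) ^ (p + 1) := by
      push_cast
      rw [hpow]
    have hsr : start >>> (4 * (p + 1)) = start / (16 : Int) ^ (p + 1) := by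
      rw [Int.shiftRight_eq_div_pow, hpowc]
    have hsl : (start / (16 : Int) ^ (p + 1) + 1) <<< (4 * (p + 1))
        = (start / (16 : Int) ^ (p + 1) + 1) * (16 : Int) ^ (p + 1) := by
      rw [Int.shiftLeft_eq, hpow]
    rw [hsr, hsl]
    -- start - t is a multiple of 2^64, hence of every 16^(i+1) with i ≤ 15
    have hst : start - t = 2 ^ 64 * (start / 2 ^ 64) := by
      have h := Int.emod_def start (2 ^ 64)
      omega
    have hdvd64 : ∀ i : Nat, i ≤ 15 → (16 : Int) ^ (i + 1) ∣ (start - t) := by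
      intro i hi
      rw [hst]
      refine Dvd.dvd.mul_right ?_ _
      have : (16 : Int) ^ (i + 1) ∣ (16 : Int) ^ 16 := pow_dvd_pow 16 (by omega)
      calc (16 : Int) ^ (i + 1) ∣ (16 : Int) ^ 16 := this
        _ = 2 ^ 64 := by norm_num
    -- nibbles of start below p are zero
    have hnlow : ∀ i : Nat, i < p → start / (16 : Int) ^ i % 16 = 0 := by
      intro i hip
      apply nibbleZero
      have hidvd_t : (16 : Int) ^ (i + 1) ∣ t := by
        rw [← htc, hq]
        have hnat : (16 : Nat) ^ (i + 1) ∣ 2 ^ j * q := by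
          rw [show (16 : Nat) ^ (i + 1) = 2 ^ (4 * (i + 1)) from by
            rw [show (16 : Nat) = 2 ^ 4 from rfl, ← pow_mul]]
          exact Dvd.dvd.mul_right (pow_dvd_pow 2 (by omega)) q
        exact_mod_cast Int.natCast_dvd_natCast.mpr hnat
      have hidvd_d : (16 : Int) ^ (i + 1) ∣ (start - t) := hdvd64 i (by omega)
      have := dvd_add hidvd_d hidvd_t
      simpa using this
    -- nibble p of start is nonzero
    have hnp : start / (16 : Int) ^ p % 16 ≠ 0 := by
      rw [nriNibbleCongr p start t (hdvd64 p (by omega))]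
      rw [← htc, hq]
      have hdivN : (2 ^ j * q) / 16 ^ p = 2 ^ (j - 4 * p) * q := by
        rw [show (16 : Nat) ^ p = 2 ^ (4 * p) from by
              rw [show (16 : Nat) = 2 ^ 4 from rfl, ← pow_mul],
            show (2 : Nat) ^ j = 2 ^ (4 * p) * 2 ^ (j - 4 * p) from by
              rw [← pow_add]; congr 1; omega,
            Nat.mul_assoc, Nat.mul_div_cancel_left _ (Nat.two_pow_pos _)]
      have hcast : ((2 ^ j * q : Nat) : Int) / (16 : Int) ^ p % 16
          = (((2 ^ j * q) / 16 ^ p % 16 : Nat) : Int) := by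
        push_cast [Int.natCast_div]
        norm_num
      rw [hcast, hdivN]
      have hne : (2 ^ (j - 4 * p) * q) % 16 ≠ 0 := by
        have hr : j - 4 * p ≤ 3 := by omega
        set r := j - 4 * p with hrdef
        clear_value r
        rw [hs]
        interval_cases r <;> (norm_num; omega)
      exact_mod_cast fun hcontra => hne (by exact_mod_cast hcontra)
    exact (nriHit 16 0 start p (Nat.zero_le _) (by omega)
      (fun i _ hip => hnlow i hip) hnp).symm

-- ===== VERDICT (by name: the statement is the Claim_ definition above) =====
theorem next_required_intermediate_spec : Claim_equal_next_required_intermediate := by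
  intro start _
  unfold Spec_next_required_intermediate next_required_intermediate
  have h1 : PySem.List.pyRange 15 (-1) (-1) = (nriAsc 0 16).reverse := by decide
  rw [nriAltEq]
  rw [h1]
  simpa using nriMain 16 0 start (by simp)
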